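-- pv_equiv track=rewrite | github.com/Ike28/UBB-FMI-Informatica | Anul I/Fundamentele programarii/lab03/main.py | lista_numere_reprezentare_binara
-- ===== SOURCE A (Python) =====
-- def numar_biti_binar(numar):
--     '''
--     Calculeaza numarul de biti cu valoarea 1 din reprezentarea in baza 2 a unui numar
--     :param numar: numarul dat, int
--     :return: rezultatul (numarul de biti egali cu 1 din B2), int
--     '''
--
--     if numar<0:
--         numar *= -1
--
--     rezultat = 0
--
--     while numar:
--         rezultat += numar%2
--         numar //= 2
--
--     return rezultat
--
-- def lista_numere_reprezentare_binara(lst):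
--     '''
--     Verifica daca o lista data este formata numai din elemente cu acelasi numar de biti 1 in reprezentare binara
--     :param lst: lista data
--     :return: True daca lst indeplineste proprietatea, False altfel
--     '''
--
--     if lst == []:
--         return True
--     numar = numar_biti_binar(lst[0])
--
--     for element in lst:
--         if numar_biti_binar(element) != numar:
--             return False
--     return True
-- ===== SOURCE B (Python) =====
-- def numar_biti_binar(numar):
--     numar = abs(numar)
--     if numar == 0:
--         return 0
--     return (numar & 1) + numar_biti_binar(numar >> 1)
--
-- def lista_numere_reprezentare_binara(lst):
--     counts = [numar_biti_binar(x) for x in lst]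
--     return counts.count(counts[0]) == len(counts) if counts else True
-- ===== Notes on version B (the rewrite author's own statement) =====
-- stated objective: alternative
-- what changed: Popcount is computed by recursion on the shifted value instead of a while-loop with an accumulator, and the outer check builds the full list of counts and tests that the first count's number of occurrences equals the list length, instead of remembering the first count and scanning with an early-exit loop.
import Mathlib
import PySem

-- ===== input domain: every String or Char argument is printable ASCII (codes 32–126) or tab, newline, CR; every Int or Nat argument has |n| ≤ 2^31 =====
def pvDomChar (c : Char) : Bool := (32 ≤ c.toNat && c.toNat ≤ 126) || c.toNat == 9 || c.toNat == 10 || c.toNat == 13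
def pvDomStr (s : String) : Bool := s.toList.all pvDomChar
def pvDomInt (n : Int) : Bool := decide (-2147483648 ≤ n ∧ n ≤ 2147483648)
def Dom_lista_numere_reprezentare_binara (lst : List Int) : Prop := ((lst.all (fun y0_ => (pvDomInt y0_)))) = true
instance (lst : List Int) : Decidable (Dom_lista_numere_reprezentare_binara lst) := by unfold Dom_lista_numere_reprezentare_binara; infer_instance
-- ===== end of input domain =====

-- B computes each popcount by recursion on the shifted value and checks homogeneity by
-- counting the first count's occurrences against the list length; same cost, different shape.


-- ===== PORT A =====
-- A's while-loop runs on the absolute value (nonnegative), so it is structural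
-- recursion on Nat; each step adds numar % 2 to the accumulator and halves numar.
def numarBitiLoop (numar : Nat) (rezultat : Int) : Int :=
  if numar = 0 then rezultat
  else numarBitiLoop (numar / 2) (rezultat + (numar % 2 : Nat))
decreasing_by exact Nat.div_lt_self (Nat.pos_of_ne_zero (by assumption)) (by omega)

def numar_biti_binar (numar : Int) : Int :=
  let numar := if numar < 0 then numar * (-1) else numar
  numarBitiLoop numar.toNat 0

-- A's for-loop with early exit on the first mismatching element
def listaLoopA (numar : Int) : List Int → Bool
  | [] => true
  | element :: rest =>
    if numar_biti_binar element ≠ numar then false else listaLoopA numar rest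

def lista_numere_reprezentare_binara (lst : List Int) : Bool :=
  if lst = [] then true
  else
    let numar := numar_biti_binar (lst.headI)
    listaLoopA numar lst

-- ===== PORT B =====
-- B's recursive popcount: (n & 1) + popcount(n >> 1); abs makes the argument a Nat
def numarBitiRec (n : Nat) : Int :=
  if n = 0 then 0
  else ((n % 2 : Nat) : Int) + numarBitiRec (n / 2)
decreasing_by exact Nat.div_lt_self (Nat.pos_of_ne_zero (by assumption)) (by omega)

def numar_biti_binar_alt (numar : Int) : Int := numarBitiRec numar.natAbs

def lista_numere_reprezentare_binara_alt (lst : List Int) : Bool :=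
  let counts := lst.map numar_biti_binar_alt
  if counts = [] then true
  else decide (PySem.List.count counts counts.headI = counts.length)

-- ===== PRECONDITION & SPEC =====
def Spec_lista_numere_reprezentare_binara (lst : List Int) (out : Bool) : Prop := out = lista_numere_reprezentare_binara_alt lst
instance (lst : List Int) (out : Bool) : Decidable (Spec_lista_numere_reprezentare_binara lst out) := by unfold Spec_lista_numere_reprezentare_binara; infer_instance

-- ===== CLAIM (what is proved, stated in full; the proofs are below) =====
def Claim_equal_lista_numere_reprezentare_binara : Prop := ∀ (lst : List Int), Dom_lista_numere_reprezentare_binara lst → Spec_lista_numere_reprezentare_binara lst (lista_numere_reprezentare_binara lst)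

-- ===== LEMMAS AND PROOFS =====

-- the accumulator loop computes rezultat + the recursive popcount
theorem numarBitiLoop_eq (n : Nat) (r : Int) : numarBitiLoop n r = r + numarBitiRec n := by
  induction n using Nat.strong_induction_on generalizing r with
  | _ n ih =>
    rw [numarBitiLoop, numarBitiRec]
    by_cases h : n = 0
    · simp [h]
    · rw [if_neg h, if_neg h, ih (n / 2) (Nat.div_lt_self (Nat.pos_of_ne_zero h) (by omega))]
      ring

theorem numar_biti_eq (x : Int) : numar_biti_binar x = numar_biti_binar_alt x := by
  unfold numar_biti_binar numar_biti_binar_alt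
  rw [numarBitiLoop_eq, zero_add]
  congr 1
  by_cases h : x < 0 <;> simp [h] <;> omega

-- A's loop returns true iff every element's popcount equals numar
theorem listaLoopA_eq_all (numar : Int) (l : List Int) :
    listaLoopA numar l = l.all (fun e => numar_biti_binar e == numar) := by
  induction l with
  | nil => rfl
  | cons e rest ih =>
    simp only [listaLoopA, List.all_cons, ih]
    by_cases h : numar_biti_binar e = numar <;> simp [h]

-- ===== VERDICT (by name: the statement is the Claim_ definition above) =====
theorem lista_numere_reprezentare_binara_spec : Claim_equal_lista_numere_reprezentare_binara := by
  intro lst _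
  unfold Spec_lista_numere_reprezentare_binara lista_numere_reprezentare_binara
    lista_numere_reprezentare_binara_alt
  match lst with
  | [] => simp
  | a :: rest =>
    simp only [if_neg (by simp : ¬(a :: rest = []))]
    rw [listaLoopA_eq_all]
    have hmap : (a :: rest).map numar_biti_binar_alt ≠ [] := by simp
    rw [if_neg hmap]
    rw [Bool.eq_iff_iff, decide_eq_true_iff, PySem.List.count_eq, List.count_eq_length]
    simp only [List.all_eq_true, beq_iff_eq, List.headI, List.map_cons]
    constructor
    · intro h y hy
      rcases List.mem_cons.mp hy with rfl | hy'
      · rfl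
      · obtain ⟨u, hu, rfl⟩ := List.mem_map.mp hy'
        rw [← numar_biti_eq u, ← numar_biti_eq a]
        exact (h u (by simp [hu])).symm
    · intro h e he
      have hm : numar_biti_binar_alt e ∈ numar_biti_binar_alt a :: List.map numar_biti_binar_alt rest := by
        rcases List.mem_cons.mp he with rfl | he'
        · exact List.mem_cons_self
        · exact List.mem_cons_of_mem _ (List.mem_map_of_mem he')
      have := (h _ hm).symm
      rw [numar_biti_eq e, numar_biti_eq a, this]
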